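-- pv_equiv track=rewrite | github.com/miliar/Code_Jam_Webscraper | solutions_python/Problem_181/1408.py | solve
-- ===== SOURCE A (Python) =====
-- def solve(s):
--     m = s[0]
--     res = ""
--     res += m
--     for c in s[1:]:
--         if c >= m:
--             m = c
--             res = c + res
--         else:
--             res = res + c
--     return res
-- ===== SOURCE B (Python) =====
-- def solve(s):
--     mx = []
--     for c in s:
--         mx.append(c if not mx or c >= mx[-1] else mx[-1])
--     front = [s[0]] + [c for c, p in zip(s[1:], mx) if c >= p]
--     back = [c for c, p in zip(s[1:], mx) if c < p]
--     return ''.join(front[::-1] + back)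
-- ===== Notes on version B (the rewrite author's own statement) =====
-- stated objective: faster
-- what changed: B replaces A's incremental prepend/append construction (quadratic string copying) by staged passes: first build a prefix-maximum table, then two filtering passes over the characters zipped with that table pick the front (reversed) and back parts, assembled with one join.
import Mathlib
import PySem

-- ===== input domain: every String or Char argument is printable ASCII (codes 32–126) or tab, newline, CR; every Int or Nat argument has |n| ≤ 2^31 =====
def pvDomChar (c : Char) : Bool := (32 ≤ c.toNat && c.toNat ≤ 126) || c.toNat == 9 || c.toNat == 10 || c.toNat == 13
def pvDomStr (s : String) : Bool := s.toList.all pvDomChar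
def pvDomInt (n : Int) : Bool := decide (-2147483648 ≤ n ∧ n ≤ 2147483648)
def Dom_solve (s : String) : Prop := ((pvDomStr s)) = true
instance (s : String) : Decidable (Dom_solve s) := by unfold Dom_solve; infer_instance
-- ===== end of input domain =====

-- B builds a prefix-maximum table and assembles the answer by two filtering passes
-- (front reversed ++ back), instead of A's incremental quadratic string building.

-- ===== PORT A =====
-- A's loop: prepend c when c >= m (updating m), else append c.
def solveLoopA (m : Char) (res : List Char) : List Char → List Char
  | [] => res
  | c :: cs => if m ≤ c then solveLoopA c (c :: res) cs else solveLoopA m (res ++ [c]) cs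

def solve (s : String) : String :=
  match s.toList with
  | [] => ""   -- unreachable under Pre_solve: Python raises IndexError on ""
  | h :: t => String.mk (solveLoopA h [h] t)

-- ===== PORT B =====
-- pass 1: mx.append(c if not mx or c >= mx[-1] else mx[-1])
def mxLoop (mx : List Char) : List Char → List Char
  | [] => mx
  | c :: cs =>
      let v := match mx.getLast? with
        | none => c
        | some l => if l ≤ c then c else l
      mxLoop (mx ++ [v]) cs

def solve_alt (s : String) : String :=
  match s.toList with
  | [] => ""   -- unreachable under Pre_solve: Python B raises IndexError (s[0]) on ""
  | h :: t =>
      let mx := mxLoop [] (h :: t)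
      let front := h :: ((t.zip mx).filter (fun p => p.2 ≤ p.1)).map Prod.fst
      let back := ((t.zip mx).filter (fun p => ¬ p.2 ≤ p.1)).map Prod.fst
      String.mk (front.reverse ++ back)

-- ===== PRECONDITION & SPEC =====
-- Both A and B raise IndexError (s[0]) on the empty string; Pre_ excludes exactly it.
def Pre_solve (s : String) : Prop := s ≠ ""
instance (s : String) : Decidable (Pre_solve s) := by unfold Pre_solve; infer_instance
def pvWitness_solve : String := "cab"

def Spec_solve (s : String) (out : String) : Prop := out = solve_alt s
instance (s : String) (out : String) : Decidable (Spec_solve s out) := by unfold Spec_solve; infer_instance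

-- ===== CLAIM (what is proved, stated in full; the proofs are below) =====
def Claim_equal_solve : Prop := ∀ (s : String), Dom_solve s → Pre_solve s → Spec_solve s (solve s)

-- ===== LEMMAS AND PROOFS =====
-- pm m l = the prefix-maximum table of l with seed m (mx[i] with running max).
def pm (m : Char) : List Char → List Char
  | [] => []
  | c :: cs => let m' := if m ≤ c then c else m; m' :: pm m' cs

theorem mxLoop_eq_pm (l : List Char) : ∀ (acc : List Char) (m : Char),
    acc.getLast? = some m → mxLoop acc l = acc ++ pm m l := by
  induction l with
  | nil => intro acc m _; simp [mxLoop, pm]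
  | cons c cs ih =>
      intro acc m h
      have hlast : (acc ++ [if m ≤ c then c else m]).getLast? = some (if m ≤ c then c else m) := by
        simp
      simp only [mxLoop, pm, h]
      rw [ih (acc ++ [if m ≤ c then c else m]) (if m ≤ c then c else m) hlast]
      simp

theorem loopA_eq_filters (t : List Char) : ∀ (m : Char) (res : List Char),
    solveLoopA m res t
      = (((t.zip (m :: pm m t)).filter (fun p => p.2 ≤ p.1)).map Prod.fst).reverse
        ++ res
        ++ ((t.zip (m :: pm m t)).filter (fun p => ¬ p.2 ≤ p.1)).map Prod.fst := by
  induction t with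
  | nil => intro m res; simp [solveLoopA]
  | cons c cs ih =>
      intro m res
      by_cases h : m ≤ c
      · simp only [solveLoopA, pm, h, List.zip_cons_cons, List.filter_cons,
          decide_eq_true_eq]
        rw [ih c (c :: res)]
        simp [List.append_assoc]
      · simp only [solveLoopA, pm, h, List.zip_cons_cons, List.filter_cons,
          decide_eq_true_eq]
        rw [ih m (res ++ [c])]
        simp [List.append_assoc]

-- ===== VERDICT (by name: the statement is the Claim_ definition above) =====
theorem solve_spec : Claim_equal_solve := by
  intro s _ _
  unfold Spec_solve solve solve_alt
  cases hs : s.toList with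
  | nil => rfl
  | cons h t =>
      have hmx : mxLoop [] (h :: t) = h :: pm h t := by
        have : mxLoop [h] t = [h] ++ pm h t := mxLoop_eq_pm t [h] h (by simp)
        simpa [mxLoop] using this
      simp only [hmx]
      have := loopA_eq_filters t h [h]
      rw [this]
      simp [List.append_assoc]
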